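-- pv_equiv track=rewrite | github.com/tattoosav/aegis | src/aegis/sensors/process.py | _compute_lineage_depths
-- ===== SOURCE A (Python) =====
-- def _compute_lineage_depths(pid_to_ppid: dict[int, int]) -> dict[int, int]:
--     """Compute lineage depth for all PIDs from a pid->ppid mapping.
--
--     This avoids per-process psutil.Process() calls by using the already
--     collected parent mapping. Depth 0 = root process (ppid=0 or self-parent).
--     Handles cycles in the process tree gracefully.
--     """
--     cache: dict[int, int] = {}
--
--     def _depth(pid: int, visiting: set[int]) -> int:
--         if pid in cache:
--             return cache[pid]
--         ppid = pid_to_ppid.get(pid, 0)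
--         # Base cases: root, self-parent, unknown parent, or cycle
--         if ppid == 0 or ppid == pid or ppid not in pid_to_ppid or ppid in visiting:
--             cache[pid] = 0
--             return 0
--         visiting.add(pid)
--         d = 1 + _depth(ppid, visiting)
--         cache[pid] = d
--         return d
--
--     for pid in pid_to_ppid:
--         if pid not in cache:
--             _depth(pid, set())
--
--     return cache
-- ===== SOURCE B (Python) =====
-- def _compute_lineage_depths(pid_to_ppid: dict[int, int]) -> dict[int, int]:
--     """Chain-collection version: for each start, collect the whole ancestor
--     chain into one list (stopping at a cached node or a root/unknown/cycle
--     base case), then assign depths to the collected chain with enumerate."""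
--     cache: dict[int, int] = {}
--     for start in pid_to_ppid:
--         chain = [start]
--         while True:
--             cur = chain[-1]
--             if cur in cache:
--                 base = cache[cur]
--                 chain.pop()
--                 break
--             p = pid_to_ppid.get(cur, 0)
--             if p == 0 or p not in pid_to_ppid or p in chain:
--                 cache[cur] = 0
--                 base = 0
--                 chain.pop()
--                 break
--             chain.append(p)
--         for i, n in enumerate(reversed(chain)):
--             cache[n] = base + 1 + i
--     return cache
-- ===== Notes on version B (the rewrite author's own statement) =====
-- stated objective: alternative
-- what changed: A's recursive memoised _depth with a per-start visiting set is replaced by a non-recursive chain-collection pass: each start's whole ancestor chain is gathered into one list (membership in the chain itself detects cycles, so no visiting set), and depths are then assigned to the chain with a single enumerate loop.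
import Mathlib
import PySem

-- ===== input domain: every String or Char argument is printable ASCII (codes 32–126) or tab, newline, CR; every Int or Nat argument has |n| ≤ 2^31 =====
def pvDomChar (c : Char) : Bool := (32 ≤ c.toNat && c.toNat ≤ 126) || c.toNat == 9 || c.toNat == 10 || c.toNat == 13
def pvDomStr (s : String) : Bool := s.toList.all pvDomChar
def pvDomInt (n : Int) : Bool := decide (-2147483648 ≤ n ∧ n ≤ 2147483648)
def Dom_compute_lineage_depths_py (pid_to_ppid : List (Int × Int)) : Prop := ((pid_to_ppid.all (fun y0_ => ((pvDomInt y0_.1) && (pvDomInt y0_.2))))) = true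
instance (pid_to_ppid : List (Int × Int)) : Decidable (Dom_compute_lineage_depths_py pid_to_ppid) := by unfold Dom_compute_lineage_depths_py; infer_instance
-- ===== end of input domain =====

-- B replaces A's recursive memoised _depth (with a visiting set) by a non-recursive
-- chain-collection pass with one enumerate assignment loop (alternative decomposition).

-- ===== PORT A =====
-- A's recursive _depth(pid, visiting): returns (depth, updated cache).  Python recursion
-- is ported with a fuel argument; the fuel chosen at the call site (size+2) always
-- suffices because each recursive step adds a fresh key of the dict to `visiting`.
def pvDepthA (m : PySem.Dict Int Int) :
    Nat → Int → PySem.Set Int → PySem.Dict Int Int → Int × PySem.Dict Int Int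
  | 0, _, _, cache => (0, cache)
  | fuel+1, pid, visiting, cache =>
    match cache.get? pid with
    | some v => (v, cache)
    | none =>
      let ppid := m.getD pid 0
      if ppid == 0 || ppid == pid || !(m.contains ppid) || PySem.Set.contains visiting ppid then
        (0, cache.insert pid 0)
      else
        let r := pvDepthA m fuel ppid (PySem.Set.add visiting pid) cache
        (1 + r.1, r.2.insert pid (1 + r.1))

-- the top-level 'for pid in pid_to_ppid: if pid not in cache: _depth(pid, set())'
def pvLoopA (m : PySem.Dict Int Int) : List Int → PySem.Dict Int Int → PySem.Dict Int Int
  | [], cache => cache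
  | pid :: rest, cache =>
    pvLoopA m rest
      (if cache.contains pid then cache
       else (pvDepthA m (m.size + 2) pid PySem.Set.empty cache).2)

def compute_lineage_depths_py (pid_to_ppid : List (Int × Int)) : List (Int × Int) :=
  let m := PySem.Dict.ofList pid_to_ppid
  (pvLoopA m m.keys PySem.Dict.empty).items

-- ===== PORT B =====
-- B's inner while-loop.  Python's `chain` list (appended at the tail, inspected at
-- chain[-1], popped at the tail, iterated reversed) is represented here in REVERSE
-- (`rchain`): Python's chain[-1] is rchain's head, chain.append is cons, chain.pop is
-- tail, and `reversed(chain)` is rchain itself; `p in chain` is order-independent.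
-- Returns (base, updated cache, popped rchain); fuel (size+2) always suffices since
-- the loop only advances to a dict key not yet in the chain.
def pvWalkB (m : PySem.Dict Int Int) :
    Nat → List Int → PySem.Dict Int Int → Int × PySem.Dict Int Int × List Int
  | 0, rchain, cache => (0, cache, rchain.tail)
  | fuel+1, rchain, cache =>
    let cur := rchain.headD 0
    match cache.get? cur with
    | some b => (b, cache, rchain.tail)
    | none =>
      let p := m.getD cur 0
      if p == 0 || !(m.contains p) || rchain.contains p then
        (0, cache.insert cur 0, rchain.tail)
      else
        pvWalkB m fuel (p :: rchain) cache

-- 'for i, n in enumerate(reversed(chain)): cache[n] = base + 1 + i'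
def pvAssignB (base : Int) (cache : PySem.Dict Int Int) (rchain : List Int) :
    PySem.Dict Int Int :=
  rchain.zipIdx.foldl (fun c ni => c.insert ni.1 (base + 1 + (ni.2 : Int))) cache

def compute_lineage_depths_py_alt (pid_to_ppid : List (Int × Int)) : List (Int × Int) :=
  let m := PySem.Dict.ofList pid_to_ppid
  (m.keys.foldl
    (fun cache start =>
      let r := pvWalkB m (m.size + 2) [start] cache
      pvAssignB r.1 r.2.1 r.2.2)
    PySem.Dict.empty).items

-- ===== PRECONDITION & SPEC =====
def Spec_compute_lineage_depths_py (pid_to_ppid : List (Int × Int)) (out : List (Int × Int)) : Prop := out = compute_lineage_depths_py_alt pid_to_ppid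
instance (pid_to_ppid : List (Int × Int)) (out : List (Int × Int)) : Decidable (Spec_compute_lineage_depths_py pid_to_ppid out) := by unfold Spec_compute_lineage_depths_py; infer_instance

-- ===== CLAIM (what is proved, stated in full; the proofs are below) =====
def Claim_equal_compute_lineage_depths_py : Prop := ∀ (pid_to_ppid : List (Int × Int)), Dom_compute_lineage_depths_py pid_to_ppid → Spec_compute_lineage_depths_py pid_to_ppid (compute_lineage_depths_py pid_to_ppid)

-- ===== LEMMAS AND PROOFS =====

-- enumerate-assignment along 'ns ++ [cur]' ends with one extra insert
theorem pvAssignB_append (b : Int) (cache : PySem.Dict Int Int) (ns : List Int) (cur : Int) :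
    pvAssignB b cache (ns ++ [cur]) = (pvAssignB b cache ns).insert cur (b + 1 + ns.length) := by
  simp [pvAssignB, List.zipIdx_append, List.foldl_append]

-- key correspondence: A's recursive _depth equals B's chain walk followed by the
-- enumerate assignment, where `visiting` holds exactly the elements of `rest`.
theorem pvDepthA_eq_walk (m : PySem.Dict Int Int) :
    ∀ (fuel : Nat) (cur : Int) (rest : List Int) (visiting : PySem.Set Int)
      (cache : PySem.Dict Int Int),
    (∀ y, PySem.Set.contains visiting y = rest.contains y) →
    ∃ b c ns,
      pvWalkB m fuel (cur :: rest) cache = (b, c, ns ++ rest) ∧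
      pvDepthA m fuel cur visiting cache = (b + ns.length, pvAssignB b c ns) := by
  intro fuel
  induction fuel with
  | zero =>
    intro cur rest visiting cache _
    exact ⟨0, cache, [], by simp [pvWalkB], by simp [pvDepthA, pvAssignB]⟩
  | succ fuel ih =>
    intro cur rest visiting cache hvis
    simp only [pvWalkB, pvDepthA, List.headD_cons]
    cases h : cache.get? cur with
    | some v =>
      exact ⟨v, cache, [], by simp, by simp [pvAssignB]⟩
    | none =>
      simp only []
      -- the two stop conditions are the same Boolean
      have hcond : (m.getD cur 0 == 0 || m.getD cur 0 == cur || !(m.contains (m.getD cur 0))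
            || PySem.Set.contains visiting (m.getD cur 0))
          = (m.getD cur 0 == 0 || !(m.contains (m.getD cur 0))
            || (cur :: rest).contains (m.getD cur 0)) := by
        rw [hvis, List.contains_cons]
        cases m.getD cur 0 == 0 <;> cases m.getD cur 0 == cur <;>
          cases m.contains (m.getD cur 0) <;> cases rest.contains (m.getD cur 0) <;> rfl
      rw [hcond]
      by_cases hb : (m.getD cur 0 == 0 || !(m.contains (m.getD cur 0))
          || (cur :: rest).contains (m.getD cur 0)) = true
      · rw [if_pos hb, if_pos hb]
        exact ⟨0, cache.insert cur 0, [], by simp, by simp [pvAssignB]⟩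
      · rw [if_neg hb, if_neg hb]
        obtain ⟨b, c, ns, hw, hd⟩ :=
          ih (m.getD cur 0) (cur :: rest) (PySem.Set.add visiting cur) cache
            (by intro y
                rw [Bool.eq_iff_iff]
                have hv := hvis y
                rw [Bool.eq_iff_iff] at hv
                simp only [PySem.Set.contains_iff, PySem.Set.mem_add, List.contains_cons,
                  Bool.or_eq_true, beq_iff_eq, List.contains_iff_mem] at *
                tauto)
        refine ⟨b, c, ns ++ [cur], by simpa using hw, ?_⟩
        simp only [hd, pvAssignB_append, List.length_append, List.length_cons,
          List.length_nil, Prod.mk.injEq]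
        refine ⟨by push_cast; ring, ?_⟩
        congr 1
        ring

-- the two top-level loops agree step by step
theorem pvLoopA_eq_foldl (m : PySem.Dict Int Int) :
    ∀ (ks : List Int) (cache : PySem.Dict Int Int),
    pvLoopA m ks cache =
      ks.foldl
        (fun cache start =>
          let r := pvWalkB m (m.size + 2) [start] cache
          pvAssignB r.1 r.2.1 r.2.2)
        cache := by
  intro ks
  induction ks with
  | nil => intro cache; rfl
  | cons k ks ih =>
    intro cache
    obtain ⟨b, c, ns, hw, hd⟩ :=
      pvDepthA_eq_walk m (m.size + 2) k [] PySem.Set.empty cache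
        (by intro y; simp [PySem.Set.empty, PySem.Set.contains])
    simp only [List.append_nil] at hw
    have hstep :
        (if cache.contains k then cache
         else (pvDepthA m (m.size + 2) k PySem.Set.empty cache).2) =
        (let r := pvWalkB m (m.size + 2) [k] cache
         pvAssignB r.1 r.2.1 r.2.2) := by
      by_cases hc : cache.contains k = true
      · obtain ⟨v, hv⟩ : ∃ v, cache.get? k = some v := by
          rw [PySem.Dict.contains_eq_isSome_get?] at hc
          exact Option.isSome_iff_exists.mp hc
        have hwv : pvWalkB m (m.size + 2) [k] cache = (v, cache, []) := by
          simp [pvWalkB, hv]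
        rw [if_pos hc, hwv]
        simp [pvAssignB]
      · rw [if_neg hc]
        simp only [hw, hd]
    simp only [pvLoopA, List.foldl_cons, ih, hstep]

-- ===== VERDICT (by name: the statement is the Claim_ definition above) =====
theorem compute_lineage_depths_py_spec : Claim_equal_compute_lineage_depths_py := by
  intro pid_to_ppid _
  unfold Spec_compute_lineage_depths_py
  simp only [compute_lineage_depths_py, compute_lineage_depths_py_alt, pvLoopA_eq_foldl]
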